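-- pv_equiv track=rewrite | github.com/Shubham00-3/Indian-Legal-Document-Analyzer | legal_document_comparison.py | _extract_key_differences
-- ===== SOURCE A (Python) =====
-- def _extract_key_differences(diff):
--     """Extract key differences from a diff result"""
--     key_diffs = {
--         "added": [],
--         "removed": []
--     }
--
--     # Look for consecutive additions or removals
--     current_addition = []
--     current_removal = []
--
--     for item in diff:
--         if item.startswith('+ '):
--             current_addition.append(item[2:])
--             if current_removal:
--                 if len(current_removal) > 2:  # Only track significant changes
--                     key_diffs["removed"].append(' '.join(current_removal))
--                 current_removal = []
--         elif item.startswith('- '):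
--             current_removal.append(item[2:])
--             if current_addition:
--                 if len(current_addition) > 2:  # Only track significant changes
--                     key_diffs["added"].append(' '.join(current_addition))
--                 current_addition = []
--         else:
--             # Handle end of sequences
--             if current_addition and len(current_addition) > 2:
--                 key_diffs["added"].append(' '.join(current_addition))
--             if current_removal and len(current_removal) > 2:
--                 key_diffs["removed"].append(' '.join(current_removal))
--             current_addition = []
--             current_removal = []
--
--     # Handle any remaining sequences
--     if current_addition and len(current_addition) > 2:
--         key_diffs["added"].append(' '.join(current_addition))
--     if current_removal and len(current_removal) > 2:
--         key_diffs["removed"].append(' '.join(current_removal))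
--
--     return key_diffs
-- ===== SOURCE B (Python) =====
-- def _extract_key_differences(diff):
--     """Extract key differences: group the diff into maximal consecutive runs first, then process each run."""
--     def key(s):
--         return 1 if s.startswith('+ ') else -1 if s.startswith('- ') else 0
--
--     # phase 1: split into maximal runs of equal key
--     groups = []
--     i = 0
--     n = len(diff)
--     while i < n:
--         k = key(diff[i])
--         j = i + 1
--         while j < n and key(diff[j]) == k:
--             j += 1
--         groups.append((k, diff[i:j]))
--         i = j
--
--     # phase 2: process the runs
--     added = []
--     removed = []
--     for k, run in groups:
--         if k != 0:
--             items = [s[2:] for s in run]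
--             if len(items) > 2:
--                 (added if k == 1 else removed).append(' '.join(items))
--     return {"added": added, "removed": removed}
-- ===== Notes on version B (the rewrite author's own statement) =====
-- stated objective: simpler
-- what changed: B first splits the diff into maximal consecutive runs of equal kind ('+ ', '- ', neutral) and then processes each run, replacing A's streaming loop that carries two buffers and flushes them on every transition.
import Mathlib
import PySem

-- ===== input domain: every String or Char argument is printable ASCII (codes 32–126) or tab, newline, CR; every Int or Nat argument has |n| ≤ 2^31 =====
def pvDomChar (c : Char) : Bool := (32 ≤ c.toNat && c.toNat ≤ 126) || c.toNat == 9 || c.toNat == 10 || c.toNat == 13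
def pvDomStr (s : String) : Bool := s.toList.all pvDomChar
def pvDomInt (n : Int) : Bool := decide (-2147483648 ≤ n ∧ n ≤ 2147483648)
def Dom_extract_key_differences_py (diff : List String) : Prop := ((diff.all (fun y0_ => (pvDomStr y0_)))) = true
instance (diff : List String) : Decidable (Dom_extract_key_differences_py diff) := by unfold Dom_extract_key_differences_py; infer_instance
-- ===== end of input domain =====

-- B groups the diff into maximal consecutive runs first and then processes each run,
-- replacing A's streaming dual-buffer/flush-on-transition loop (objective: simpler two-phase decomposition, same cost).

-- ===== PORT A =====
-- A's for-loop over `diff`, carrying (added, removed, current_addition, current_removal).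
def pvLoopA : List String → List String → List String → List String → List String → List String × List String
  | [], added, removed, ca, cr =>
      -- trailing flush of both sequences
      (if ca ≠ [] ∧ ca.length > 2 then added ++ [PySem.Str.join " " ca] else added,
       if cr ≠ [] ∧ cr.length > 2 then removed ++ [PySem.Str.join " " cr] else removed)
  | item :: rest, added, removed, ca, cr =>
      if PySem.Str.startswith item "+ " then
        let ca' := ca ++ [PySem.Str.slice item (some 2) none]
        if cr ≠ [] then
          pvLoopA rest added (if cr.length > 2 then removed ++ [PySem.Str.join " " cr] else removed) ca' []
        else
          pvLoopA rest added removed ca' cr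
      else if PySem.Str.startswith item "- " then
        let cr' := cr ++ [PySem.Str.slice item (some 2) none]
        if ca ≠ [] then
          pvLoopA rest (if ca.length > 2 then added ++ [PySem.Str.join " " ca] else added) removed [] cr'
        else
          pvLoopA rest added removed ca cr'
      else
        pvLoopA rest
          (if ca ≠ [] ∧ ca.length > 2 then added ++ [PySem.Str.join " " ca] else added)
          (if cr ≠ [] ∧ cr.length > 2 then removed ++ [PySem.Str.join " " cr] else removed)
          [] []

def extract_key_differences_py (diff : List String) : List (String × List String) :=
  let res := pvLoopA diff [] [] [] []
  [("added", res.1), ("removed", res.2)]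

-- ===== PORT B =====
def pvKeyB (s : String) : Int :=
  if PySem.Str.startswith s "+ " then 1 else if PySem.Str.startswith s "- " then -1 else 0

-- phase 1: split into maximal runs of equal key
def pvGroupsB : List String → List (Int × List String)
  | [] => []
  | x :: xs =>
    let k := pvKeyB x
    (k, x :: xs.takeWhile (fun s => pvKeyB s == k)) :: pvGroupsB (xs.dropWhile (fun s => pvKeyB s == k))
termination_by l => l.length
decreasing_by
  simpa using Nat.lt_succ_of_le (List.length_dropWhile_le _ _)

-- phase 2: process the runs
def pvProcB : List (Int × List String) → List String → List String → List String × List String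
  | [], added, removed => (added, removed)
  | (k, run) :: gs, added, removed =>
    if k ≠ 0 then
      let items := run.map (fun s => PySem.Str.slice s (some 2) none)
      if items.length > 2 then
        if k = 1 then pvProcB gs (added ++ [PySem.Str.join " " items]) removed
        else pvProcB gs added (removed ++ [PySem.Str.join " " items])
      else pvProcB gs added removed
    else pvProcB gs added removed

def extract_key_differences_py_alt (diff : List String) : List (String × List String) :=
  let res := pvProcB (pvGroupsB diff) [] []
  [("added", res.1), ("removed", res.2)]

-- ===== PRECONDITION & SPEC =====
def Spec_extract_key_differences_py (diff : List String) (out : List (String × List String)) : Prop := out = extract_key_differences_py_alt diff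
instance (diff : List String) (out : List (String × List String)) : Decidable (Spec_extract_key_differences_py diff out) := by unfold Spec_extract_key_differences_py; infer_instance

-- ===== CLAIM (what is proved, stated in full; the proofs are below) =====
def Claim_equal_extract_key_differences_py : Prop := ∀ (diff : List String), Dom_extract_key_differences_py diff → Spec_extract_key_differences_py diff (extract_key_differences_py diff)

-- ===== LEMMAS AND PROOFS =====

-- flush of a buffer: append the join when the run is significant
def pvFlush (cur acc : List String) : List String :=
  if cur.length > 2 then acc ++ [PySem.Str.join " " cur] else acc

theorem pvKey_one {s : String} (h : pvKeyB s = 1) : PySem.Str.startswith s "+ " = true := by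
  unfold pvKeyB at h; split_ifs at h with h1 h2 <;> simp_all

theorem pvKey_neg {s : String} (h : pvKeyB s = -1) :
    PySem.Str.startswith s "+ " = false ∧ PySem.Str.startswith s "- " = true := by
  unfold pvKeyB at h; split_ifs at h with h1 h2 <;> simp_all

theorem pvKey_zero {s : String} (h : pvKeyB s = 0) :
    PySem.Str.startswith s "+ " = false ∧ PySem.Str.startswith s "- " = false := by
  unfold pvKeyB at h; split_ifs at h with h1 h2 <;> simp_all

theorem pvKey_tri (s : String) : pvKeyB s = 1 ∨ pvKeyB s = -1 ∨ pvKeyB s = 0 := by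
  unfold pvKeyB; split_ifs <;> simp

theorem pvFlush_nil (acc : List String) : pvFlush [] acc = acc := rfl

theorem pvFlush_eq_ite (cur acc : List String) :
    (if cur ≠ [] ∧ cur.length > 2 then acc ++ [PySem.Str.join " " cur] else acc) = pvFlush cur acc := by
  unfold pvFlush
  rcases cur with _ | ⟨c, cs⟩ <;> simp

-- a run of '+'-lines only accumulates into current_addition
theorem pvLoopA_plus_run (run : List String) (rest added removed ca : List String)
    (h : ∀ s ∈ run, pvKeyB s = 1) :
    pvLoopA (run ++ rest) added removed ca [] =
      pvLoopA rest added removed (ca ++ run.map (fun s => PySem.Str.slice s (some 2) none)) [] := by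
  induction run generalizing ca with
  | nil => simp
  | cons x xs ih =>
    have hx1 := pvKey_one (h x (by simp))
    simp only [List.cons_append, pvLoopA, hx1, if_pos, ne_eq, not_true_eq_false, ite_self]
    rw [ih _ (fun s hs => h s (by simp [hs]))]
    simp

-- a run of '-'-lines only accumulates into current_removal
theorem pvLoopA_minus_run (run : List String) (rest added removed cr : List String)
    (h : ∀ s ∈ run, pvKeyB s = -1) :
    pvLoopA (run ++ rest) added removed [] cr =
      pvLoopA rest added removed [] (cr ++ run.map (fun s => PySem.Str.slice s (some 2) none)) := by
  induction run generalizing cr with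
  | nil => simp
  | cons x xs ih =>
    obtain ⟨hx1, hx2⟩ := pvKey_neg (h x (by simp))
    simp only [List.cons_append, pvLoopA, hx1, hx2, Bool.false_eq_true, if_false, if_pos,
      ne_eq, not_true_eq_false, ite_self]
    rw [ih _ (fun s hs => h s (by simp [hs]))]
    simp

-- a run of neutral lines with empty buffers is a no-op
theorem pvLoopA_neutral_run (run : List String) (rest added removed : List String)
    (h : ∀ s ∈ run, pvKeyB s = 0) :
    pvLoopA (run ++ rest) added removed [] [] = pvLoopA rest added removed [] [] := by
  induction run with
  | nil => simp
  | cons x xs ih =>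
    obtain ⟨hx1, hx2⟩ := pvKey_zero (h x (by simp))
    simp only [List.cons_append, pvLoopA, hx1, hx2, Bool.false_eq_true, if_false,
      ne_eq, not_true_eq_false, false_and, if_neg, not_false_eq_true]
    exact ih (fun s hs => h s (by simp [hs]))

-- when the next line does not continue the '+'-run, flushing now or in the next step is the same
theorem pvLoopA_exit_plus (rest : List String) (added removed ca : List String)
    (h : ∀ x ∈ rest.head?, pvKeyB x ≠ 1) :
    pvLoopA rest added removed ca [] = pvLoopA rest (pvFlush ca added) removed [] [] := by
  rcases rest with _ | ⟨x, xs⟩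
  · simp only [pvLoopA, pvFlush_eq_ite, pvFlush_nil]
  · have hx := h x (by simp)
    rcases pvKey_tri x with hk | hk | hk
    · exact absurd hk hx
    · obtain ⟨hx1, hx2⟩ := pvKey_neg hk
      simp only [pvLoopA, hx1, hx2, Bool.false_eq_true, if_false, if_pos]
      rcases ca with _ | ⟨c, cs⟩
      · simp [pvFlush_nil]
      · simp only [ne_eq, reduceCtorEq, not_false_eq_true, if_pos, not_true_eq_false, if_neg]
        rw [pvFlush]
    · obtain ⟨hx1, hx2⟩ := pvKey_zero hk
      simp only [pvLoopA, hx1, hx2, Bool.false_eq_true, if_false, ne_eq, not_true_eq_false,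
        false_and, if_neg, not_false_eq_true, pvFlush_eq_ite, pvFlush_nil]

-- symmetric exit for a '-'-run
theorem pvLoopA_exit_minus (rest : List String) (added removed cr : List String)
    (h : ∀ x ∈ rest.head?, pvKeyB x ≠ -1) :
    pvLoopA rest added removed [] cr = pvLoopA rest added (pvFlush cr removed) [] [] := by
  rcases rest with _ | ⟨x, xs⟩
  · simp only [pvLoopA, pvFlush_eq_ite, pvFlush_nil]
  · have hx := h x (by simp)
    rcases pvKey_tri x with hk | hk | hk
    · have hx1 := pvKey_one hk
      simp only [pvLoopA, hx1, if_pos]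
      rcases cr with _ | ⟨c, cs⟩
      · simp [pvFlush_nil]
      · simp only [ne_eq, reduceCtorEq, not_false_eq_true, if_pos, not_true_eq_false, if_neg]
        rw [pvFlush]
    · exact absurd hk hx
    · obtain ⟨hx1, hx2⟩ := pvKey_zero hk
      simp only [pvLoopA, hx1, hx2, Bool.false_eq_true, if_false, ne_eq, not_true_eq_false,
        false_and, if_neg, not_false_eq_true, pvFlush_eq_ite, pvFlush_nil]

-- dropWhile's head fails the predicate
theorem pvHead_dropWhile {α : Type} (p : α → Bool) (l : List α) :
    ∀ x ∈ (l.dropWhile p).head?, p x = false := by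
  intro x hx
  have := List.head?_dropWhile_not p l
  rcases hhd : (l.dropWhile p).head? with _ | y
  · simp [hhd] at hx
  · simp [hhd] at hx this; simpa [hx] using this

-- main invariant: A's streaming loop equals B's group-then-process on empty buffers
theorem pvMain : ∀ (n : Nat) (l added removed : List String), l.length ≤ n →
    pvLoopA l added removed [] [] = pvProcB (pvGroupsB l) added removed := by
  intro n
  induction n with
  | zero =>
    intro l added removed hl
    rcases l with _ | _
    · simp [pvLoopA, pvGroupsB, pvProcB]
    · simp at hl
  | succ m ih =>
    intro l added removed hl
    rcases l with _ | ⟨x, xs⟩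
    · simp [pvLoopA, pvGroupsB, pvProcB]
    · rw [pvGroupsB]
      have hsplit : x :: xs =
          (x :: xs.takeWhile (fun s => pvKeyB s == pvKeyB x)) ++
            xs.dropWhile (fun s => pvKeyB s == pvKeyB x) := by
        simp
      have hmemrun : ∀ s ∈ x :: xs.takeWhile (fun s => pvKeyB s == pvKeyB x), pvKeyB s = pvKeyB x := by
        intro s hs
        rcases List.mem_cons.mp hs with rfl | hs2
        · rfl
        · simpa using List.mem_takeWhile_imp hs2
      have hhead : ∀ y ∈ (xs.dropWhile (fun s => pvKeyB s == pvKeyB x)).head?, pvKeyB y ≠ pvKeyB x := by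
        intro y hy
        simpa using pvHead_dropWhile (fun s => pvKeyB s == pvKeyB x) xs y hy
      have hrestlen : (xs.dropWhile (fun s => pvKeyB s == pvKeyB x)).length ≤ m := by
        have h1 := List.length_dropWhile_le (fun s => pvKeyB s == pvKeyB x) xs
        simp only [List.length_cons] at hl
        omega
      conv_lhs => rw [hsplit]
      rcases pvKey_tri x with hk1 | hk1 | hk1 <;> rw [hk1] at hmemrun hhead hrestlen ⊢
      · -- '+'-run
        rw [pvLoopA_plus_run _ _ added removed [] hmemrun]
        simp only [List.nil_append]
        rw [pvLoopA_exit_plus _ added removed _ hhead]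
        rw [ih _ _ removed hrestlen]
        rw [pvProcB]
        simp only [ne_eq, one_ne_zero, not_false_eq_true, if_pos, if_true]
        rw [pvFlush]
        simp only [List.length_map]
        split <;> rfl
      · -- '-'-run
        rw [pvLoopA_minus_run _ _ added removed [] hmemrun]
        simp only [List.nil_append]
        rw [pvLoopA_exit_minus _ added removed _ hhead]
        rw [ih _ added _ hrestlen]
        rw [pvProcB]
        simp only [ne_eq, neg_eq_zero, one_ne_zero, not_false_eq_true, if_pos]
        rw [pvFlush]
        simp only [List.length_map]
        have hne : ((-1 : Int) = 1) = False := by simp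
        split <;> simp [hne]
      · -- neutral run
        rw [pvLoopA_neutral_run _ _ added removed hmemrun]
        rw [ih _ added removed hrestlen]
        rw [pvProcB]
        simp

-- ===== VERDICT (by name: the statement is the Claim_ definition above) =====
theorem extract_key_differences_py_spec : Claim_equal_extract_key_differences_py := by
  intro diff _
  unfold Spec_extract_key_differences_py extract_key_differences_py extract_key_differences_py_alt
  rw [pvMain diff.length diff [] [] le_rfl]
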